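-- pv_equiv track=rewrite | github.com/AnshulP10/N-GramLanguageModel | language_model.py | get_trigrams
-- ===== SOURCE A (Python) =====
-- def get_trigrams(corpus):
--     trigrams = {}
--     for sentence in corpus.split('.'):
--         words = sentence.split(' ')
--         i = 0
--         while i < len(words) - 2:
--             if words[i] not in trigrams:
--                 trigrams[words[i]] = {}
--             if words[i+1] not in trigrams[words[i]]:
--                 trigrams[words[i]][words[i+1]] = {}
--             if words[i+2] not in trigrams[words[i]][words[i+1]]:
--                 trigrams[words[i]][words[i+1]][words[i+2]] = 1
--             else:
--                 trigrams[words[i]][words[i+1]][words[i+2]] += 1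
--             i += 1
--     return trigrams
-- ===== SOURCE B (Python) =====
-- def get_trigrams(corpus):
--     # Phase 1: one flat pass counting each (w1, w2, w3) triple.
--     flat = {}
--     for sentence in corpus.split('.'):
--         words = sentence.split(' ')
--         for t in zip(words, words[1:], words[2:]):
--             flat[t] = flat.get(t, 0) + 1
--     # Phase 2: reshape the flat table into the nested dict.
--     trigrams = {}
--     for (w1, w2, w3), c in flat.items():
--         trigrams.setdefault(w1, {}).setdefault(w2, {})[w3] = c
--     return trigrams
-- ===== Notes on version B (the rewrite author's own statement) =====
-- stated objective: alternative
-- what changed: A builds the nested dict directly with an index-based while loop and three membership checks per step; B first makes one flat pass counting (w1,w2,w3) tuples from zip(words, words[1:], words[2:]) into a flat dict, then a second pass that reshapes the flat (tuple, count) table into the nested dict via setdefault.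
import Mathlib
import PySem

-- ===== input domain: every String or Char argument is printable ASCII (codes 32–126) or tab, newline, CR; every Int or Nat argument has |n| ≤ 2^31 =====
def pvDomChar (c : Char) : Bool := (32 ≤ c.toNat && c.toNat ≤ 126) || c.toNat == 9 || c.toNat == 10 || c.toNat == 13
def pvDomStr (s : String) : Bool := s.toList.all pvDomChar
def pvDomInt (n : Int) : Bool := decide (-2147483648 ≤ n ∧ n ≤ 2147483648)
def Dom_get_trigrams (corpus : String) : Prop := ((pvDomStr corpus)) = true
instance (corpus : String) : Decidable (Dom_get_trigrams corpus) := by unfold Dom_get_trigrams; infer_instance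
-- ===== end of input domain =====

-- B restructures A: one flat counting pass over zip-triples, then a reshaping pass into the nested dict (alternative decomposition, same cost).

-- Nested dict types (type convention: dict -> insertion-ordered assoc structure)
def D1 : Type := PySem.Dict String Int
def D2 : Type := PySem.Dict String D1
def D3 : Type := PySem.Dict String D2

-- shared output conversion: the nested Dict rendered as nested assoc lists (type convention)
def toOut (d : D3) : List (String × List (String × List (String × Int))) :=
  d.items.map (fun p => (p.1, p.2.items.map (fun q => (q.1, q.2.items))))

-- ===== PORT A =====
-- one iteration of A's while-loop body (the three membership checks, in A's order;
-- Python's in-place mutation of the inner dicts is modelled by overwriting insert)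
def stepA (d : D3) (w0 w1 w2 : String) : D3 :=
  let d1 : D3 := if d.contains w0 then d else d.insert w0 PySem.Dict.empty
  let m1 : D2 := d1.getD w0 PySem.Dict.empty
  let d2 : D3 := if m1.contains w1 then d1 else d1.insert w0 (m1.insert w1 PySem.Dict.empty)
  let m1' : D2 := d2.getD w0 PySem.Dict.empty
  let m2 : D1 := m1'.getD w1 PySem.Dict.empty
  if ¬ (m2.contains w2) then
    d2.insert w0 (m1'.insert w1 (m2.insert w2 1))
  else
    d2.insert w0 (m1'.insert w1 (m2.insert w2 (m2.getD w2 0 + 1)))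

-- 'while i < len(words) - 2' (indices i, i+1, i+2 are then in range, so getD is exact)
def loopA (words : List String) (i : Nat) (d : D3) : D3 :=
  if h : (i : Int) < (words.length : Int) - 2 then
    loopA words (i + 1) (stepA d (words.getD i "") (words.getD (i + 1) "") (words.getD (i + 2) ""))
  else d
termination_by words.length - i
decreasing_by omega

def get_trigrams (corpus : String) : List (String × List (String × List (String × Int))) :=
  toOut ((((PySem.Str.split? corpus ".").getD [])).foldl
    (fun trigrams sentence => loopA (((PySem.Str.split? sentence " ").getD [])) 0 trigrams)
    PySem.Dict.empty)

-- ===== PORT B =====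
def FlatD : Type := PySem.Dict (String × String × String) Int

-- flat[t] = flat.get(t, 0) + 1
def flatInc (f : FlatD) (t : String × String × String) : FlatD :=
  f.insert t (f.getD t 0 + 1)

-- zip(words, words[1:], words[2:])
def zip3B (words : List String) : List (String × String × String) :=
  words.zip ((PySem.List.slice words (some 1) none).zip (PySem.List.slice words (some 2) none))

-- trigrams.setdefault(w1, {}).setdefault(w2, {})[w3] = c
def nestStep (d : D3) (p : (String × String × String) × Int) : D3 :=
  let w1 := p.1.1; let w2 := p.1.2.1; let w3 := p.1.2.2; let c := p.2
  let d1 : D3 := d.setdefault w1 PySem.Dict.empty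
  let m1 : D2 := d1.getD w1 PySem.Dict.empty
  let m1' : D2 := m1.setdefault w2 PySem.Dict.empty
  let m2 : D1 := m1'.getD w2 PySem.Dict.empty
  d1.insert w1 (m1'.insert w2 (m2.insert w3 c))

def get_trigrams_alt (corpus : String) : List (String × List (String × List (String × Int))) :=
  let flat : FlatD := (((PySem.Str.split? corpus ".").getD [])).foldl
    (fun f sentence => (zip3B (((PySem.Str.split? sentence " ").getD []))).foldl flatInc f)
    PySem.Dict.empty
  toOut (flat.items.foldl nestStep PySem.Dict.empty)

-- ===== PRECONDITION & SPEC =====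
def Spec_get_trigrams (corpus : String) (out : List (String × List (String × List (String × Int)))) : Prop := out = get_trigrams_alt corpus
instance (corpus : String) (out : List (String × List (String × List (String × Int)))) : Decidable (Spec_get_trigrams corpus out) := by unfold Spec_get_trigrams; infer_instance

-- ===== CLAIM (what is proved, stated in full; the proofs are below) =====
def Claim_equal_get_trigrams : Prop := ∀ (corpus : String), Dom_get_trigrams corpus → Spec_get_trigrams corpus (get_trigrams corpus)

-- ===== LEMMAS AND PROOFS =====

-- abbreviations used only by the proofs
abbrev T3 : Type := String × String × String

def tstep (d : D3) (t : T3) : D3 := stepA d t.1 t.2.1 t.2.2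

def triples (l : List String) : List T3 := l.zip ((l.drop 1).zip (l.drop 2))

def nestL (L : List (T3 × Int)) : D3 := L.foldl nestStep PySem.Dict.empty

def pathIns (d : D3) (t : T3) (v : Int) : D3 :=
  d.insert t.1 ((d.getD t.1 PySem.Dict.empty).insert t.2.1
    (((d.getD t.1 PySem.Dict.empty).getD t.2.1 PySem.Dict.empty).insert t.2.2 v))

def path (d : D3) (t : T3) : Int :=
  ((d.getD t.1 PySem.Dict.empty).getD t.2.1 PySem.Dict.empty).getD t.2.2 0

def cpath (d : D3) (t : T3) : Prop :=
  d.contains t.1 = true ∧ (d.getD t.1 PySem.Dict.empty).contains t.2.1 = true ∧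
    ((d.getD t.1 PySem.Dict.empty).getD t.2.1 PySem.Dict.empty).contains t.2.2 = true

-- two inserts at distinct keys commute when the first key is already present
theorem insert_comm_of_contains {κ ν : Type} [BEq κ] [LawfulBEq κ] (d : PySem.Dict κ ν)
    (k k' : κ) (v v' : ν) (hk : d.contains k = true) (hne : k' ≠ k) :
    (d.insert k v).insert k' v' = (d.insert k' v').insert k v := by
  have hbne : (k' == k) = false := beq_eq_false_iff_ne.mpr hne
  have hbne' : (k == k') = false := beq_eq_false_iff_ne.mpr (Ne.symm hne)
  have hk2 : (d.insert k' v').contains k = true := by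
    rw [PySem.Dict.contains_insert]; simp [hk]
  cases h' : d.contains k' with
  | false =>
    have h'2 : (d.insert k v).contains k' = false := by
      rw [PySem.Dict.contains_insert]; simp [hbne, h']
    apply PySem.Dict.ext
    rw [PySem.Dict.items_insert_of_not_contains _ _ h'2,
        PySem.Dict.items_insert_of_contains _ _ hk,
        PySem.Dict.items_insert_of_contains _ _ hk2,
        PySem.Dict.items_insert_of_not_contains _ _ h']
    simp [hbne]
  | true =>
    have h'2 : (d.insert k v).contains k' = true := by
      rw [PySem.Dict.contains_insert]; simp [h']
    apply PySem.Dict.ext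
    rw [PySem.Dict.items_insert_of_contains _ _ h'2,
        PySem.Dict.items_insert_of_contains _ _ hk,
        PySem.Dict.items_insert_of_contains _ _ hk2,
        PySem.Dict.items_insert_of_contains _ _ h']
    simp only [List.map_map]
    apply List.map_congr_left
    intro p _
    by_cases hpk : p.1 = k
    · simp [Function.comp, hpk, hbne']
    · by_cases hpk' : p.1 = k'
      · simp [Function.comp, hpk', hbne]
      · simp [Function.comp, beq_eq_false_iff_ne.mpr hpk, beq_eq_false_iff_ne.mpr hpk']

theorem stepA_eq_pathIns (d : D3) (w0 w1 w2 : String) :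
    stepA d w0 w1 w2 = pathIns d (w0, w1, w2) (path d (w0, w1, w2) + 1) := by
  unfold stepA pathIns path
  by_cases h0 : d.contains w0 = true
  · simp only [h0, if_true]
    by_cases h1 : (d.getD w0 PySem.Dict.empty).contains w1 = true
    · simp only [h1, if_true]
      by_cases h2 : ((d.getD w0 PySem.Dict.empty).getD w1 PySem.Dict.empty).contains w2 = true
      · simp [h2]
      · simp [h2, PySem.Dict.getD_of_not_contains _ _ (by simpa using h2)]
    · simp only [h1, if_false, Bool.false_eq_true,
        PySem.Dict.getD_insert_self, PySem.Dict.insert_insert_self,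
        PySem.Dict.getD_of_not_contains _ _ (eq_false_of_ne_true h1),
        PySem.Dict.contains_empty, PySem.Dict.getD_empty]
      simp
  · have h0' : d.contains w0 = false := eq_false_of_ne_true h0
    simp only [h0', Bool.false_eq_true, if_false, PySem.Dict.getD_insert_self,
      PySem.Dict.contains_empty, PySem.Dict.insert_insert_self,
      PySem.Dict.getD_of_not_contains _ _ h0', PySem.Dict.getD_empty]
    simp

theorem nestStep_eq_pathIns (d : D3) (t : T3) (c : Int) :
    nestStep d (t, c) = pathIns d t c := by
  obtain ⟨a, b, c3⟩ := t
  unfold nestStep pathIns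
  dsimp only
  by_cases h0 : d.contains a = true
  · rw [PySem.Dict.setdefault_of_contains _ _ h0]
    by_cases h1 : (d.getD a PySem.Dict.empty).contains b = true
    · rw [PySem.Dict.setdefault_of_contains _ _ h1]
    · rw [PySem.Dict.setdefault_of_not_contains _ _ (eq_false_of_ne_true h1)]
      simp [PySem.Dict.getD_insert_self, PySem.Dict.insert_insert_self,
        PySem.Dict.getD_of_not_contains _ _ (eq_false_of_ne_true h1)]
  · rw [PySem.Dict.setdefault_of_not_contains _ _ (eq_false_of_ne_true h0)]
    simp [PySem.Dict.getD_insert_self, PySem.Dict.insert_insert_self,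
      PySem.Dict.getD_of_not_contains _ _ (eq_false_of_ne_true h0),
      PySem.Dict.setdefault_of_not_contains _ _ (PySem.Dict.contains_empty b)]

theorem nestStep_eq_pathIns' (d : D3) (p : T3 × Int) :
    nestStep d p = pathIns d p.1 p.2 := by
  obtain ⟨t, c⟩ := p; exact nestStep_eq_pathIns d t c

theorem path_pathIns (d : D3) (u t : T3) (w : Int) :
    path (pathIns d u w) t = if t = u then w else path d t := by
  obtain ⟨a, b, c⟩ := u; obtain ⟨x, y, z⟩ := t
  unfold path pathIns
  by_cases hx : x = a
  · subst hx
    by_cases hy : y = b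
    · subst hy
      by_cases hz : z = c
      · subst hz; simp [PySem.Dict.getD_insert_self]
      · simp [PySem.Dict.getD_insert_self, PySem.Dict.getD_insert, hz, Prod.mk.injEq]
    · simp [PySem.Dict.getD_insert_self, PySem.Dict.getD_insert, hy, Prod.mk.injEq]
  · simp [PySem.Dict.getD_insert, hx, Prod.mk.injEq]

theorem cpath_pathIns_self (d : D3) (t : T3) (w : Int) :
    cpath (pathIns d t w) t := by
  obtain ⟨a, b, c⟩ := t
  unfold cpath pathIns
  refine ⟨PySem.Dict.contains_insert_self _ _ _, ?_, ?_⟩ <;>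
    simp [PySem.Dict.getD_insert_self, PySem.Dict.contains_insert_self]

theorem cpath_pathIns_mono (d : D3) (u t : T3) (w : Int)
    (h : cpath d t) : cpath (pathIns d u w) t := by
  obtain ⟨a, b, c⟩ := u; obtain ⟨x, y, z⟩ := t
  obtain ⟨h1, h2, h3⟩ := h
  unfold cpath pathIns at *
  by_cases hx : x = a
  · subst hx
    by_cases hy : y = b
    · subst hy
      by_cases hz : z = c
      · subst hz
        simp [PySem.Dict.getD_insert_self, PySem.Dict.contains_insert_self]
      · refine ⟨PySem.Dict.contains_insert_self _ _ _, ?_, ?_⟩ <;>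
          simp [PySem.Dict.getD_insert_self, PySem.Dict.contains_insert, h3]
    · refine ⟨PySem.Dict.contains_insert_self _ _ _, ?_, ?_⟩ <;>
        simp [PySem.Dict.getD_insert_self, PySem.Dict.contains_insert,
          PySem.Dict.getD_insert, hy, h2, h3]
  · refine ⟨?_, ?_, ?_⟩ <;>
      simp [PySem.Dict.contains_insert, PySem.Dict.getD_insert, hx, h1, h2, h3]

theorem pathIns_pathIns_self (d : D3) (t : T3) (v w : Int) :
    pathIns (pathIns d t v) t w = pathIns d t w := by
  obtain ⟨a, b, c⟩ := t
  unfold pathIns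
  simp [PySem.Dict.getD_insert_self, PySem.Dict.insert_insert_self]

theorem pathIns_comm (d : D3) (t u : T3) (v w : Int)
    (hne : t ≠ u) (hc : cpath d t) :
    pathIns (pathIns d u w) t v = pathIns (pathIns d t v) u w := by
  obtain ⟨a, b, c⟩ := t; obtain ⟨a', b', c'⟩ := u
  obtain ⟨h1, h2, h3⟩ := hc
  simp only at h1 h2 h3
  unfold pathIns at *
  dsimp only
  by_cases ha : a = a'
  · subst ha
    by_cases hb : b = b'
    · subst hb
      have hcc : c' ≠ c := by
        intro h; exact hne (by simp [h])
      simp only [PySem.Dict.getD_insert_self, PySem.Dict.insert_insert_self]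
      rw [insert_comm_of_contains _ c c' v w h3 hcc]
    · have hb' : b' ≠ b := fun h => hb h.symm
      simp only [PySem.Dict.getD_insert_self, PySem.Dict.insert_insert_self,
        PySem.Dict.getD_insert, if_neg hb, if_neg hb']
      rw [insert_comm_of_contains _ b b' _ _ h2 hb']
  · have ha' : a' ≠ a := fun h => ha h.symm
    simp only [PySem.Dict.getD_insert, if_neg ha, if_neg ha']
    rw [insert_comm_of_contains _ a a' _ _ h1 ha']

-- fold of nestStep commutes past an already-present full path
theorem nest_fold_comm (S : List (T3 × Int)) (d : D3) (t : T3) (v : Int)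
    (hnot : t ∉ S.map Prod.fst) (hc : cpath d t) :
    S.foldl nestStep (pathIns d t v) = pathIns (S.foldl nestStep d) t v := by
  induction S generalizing d with
  | nil => rfl
  | cons p S ih =>
    have hne : t ≠ p.1 := by
      intro h; exact hnot (by simp [h])
    simp only [List.foldl_cons, nestStep_eq_pathIns']
    rw [← pathIns_comm d t p.1 v p.2 hne hc]
    exact ih (pathIns d p.1 p.2) (fun h => hnot (by simp at h ⊢; exact Or.inr h))
      (cpath_pathIns_mono _ _ _ _ hc)

theorem path_nestL_fold (L : List (T3 × Int)) (d : D3) (t : T3)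
    (hnd : (L.map Prod.fst).Nodup) :
    path (L.foldl nestStep d) t = ((PySem.Dict.mk L).get? t).getD (path d t) := by
  induction L generalizing d with
  | nil =>
    simp only [List.foldl_nil]
    have : (PySem.Dict.mk [] : PySem.Dict T3 Int).get? t = none := rfl
    rw [this]; rfl
  | cons p L ih =>
    obtain ⟨u, vv⟩ := p
    simp only [List.map_cons, List.nodup_cons] at hnd
    simp only [List.foldl_cons, nestStep_eq_pathIns']
    rw [ih _ hnd.2, PySem.Dict.get?_mk_cons, path_pathIns]
    by_cases h : t = u
    · subst h
      have : (PySem.Dict.mk L : PySem.Dict T3 Int).get? t = none := by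
        rw [PySem.Dict.get?_eq_none_iff_not_mem_keys, PySem.Dict.keys_mk]
        exact hnd.1
      simp [this]
    · simp [h, beq_eq_false_iff_ne.mpr (fun hh => h hh.symm)]

theorem path_empty (t : T3) : path (PySem.Dict.empty : D3) t = 0 := by
  unfold path; simp [PySem.Dict.getD_empty]

theorem path_nestL (f : PySem.Dict T3 Int) (t : T3) (hnd : f.keys.Nodup) :
    path (nestL f.items) t = f.getD t 0 := by
  unfold nestL
  have hk : (f.items.map Prod.fst).Nodup := by
    have : f.keys = f.items.map Prod.fst := by
      cases f with | mk items => rw [PySem.Dict.keys_mk]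
    rwa [this] at hnd
  rw [path_nestL_fold _ _ _ hk, path_empty]
  have hmk : (PySem.Dict.mk f.items : PySem.Dict T3 Int) = f := by
    cases f with | mk items => rfl
  rw [hmk, PySem.Dict.getD_eq_get?_getD]

-- one flat increment corresponds to one full-path write on the nested dict
theorem nestL_flatInc (f : PySem.Dict T3 Int) (t : T3) (hnd : f.keys.Nodup) :
    nestL ((flatInc f t).items) = pathIns (nestL f.items) t (f.getD t 0 + 1) := by
  unfold flatInc
  cases hcon : f.contains t with
  | false =>
    rw [PySem.Dict.items_insert_of_not_contains _ _ hcon]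
    unfold nestL
    rw [List.foldl_append]
    simp [nestStep_eq_pathIns']
  | true =>
    -- t already a key: the items list has exactly one entry (t, old)
    obtain ⟨old, hget⟩ : ∃ old, f.get? t = some old := by
      have := PySem.Dict.contains_eq_isSome_get? f t
      rw [hcon] at this
      exact Option.isSome_iff_exists.mp this.symm
    have hgetD : f.getD t 0 = old := by
      rw [PySem.Dict.getD_eq_get?_getD, hget]; rfl
    have hmem : (t, old) ∈ f.items := PySem.Dict.mem_items_of_get?_eq_some f hget
    obtain ⟨P, S, hPS⟩ := List.append_of_mem hmem
    have hk : (f.items.map Prod.fst).Nodup := by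
      have : f.keys = f.items.map Prod.fst := by
        cases f with | mk items => rw [PySem.Dict.keys_mk]
      rwa [this] at hnd
    rw [hPS] at hk
    simp only [List.map_append, List.map_cons, List.nodup_append, List.nodup_cons] at hk
    have htP : t ∉ P.map Prod.fst := fun h => hk.2.2 t h t (by simp) rfl
    have htS : t ∉ S.map Prod.fst := hk.2.1.1
    have hitems : (f.insert t (f.getD t 0 + 1)).items = P ++ (t, f.getD t 0 + 1) :: S := by
      rw [PySem.Dict.items_insert_of_contains _ _ hcon, hPS]
      simp only [List.map_append, List.map_cons]
      congr 1
      · apply (List.map_congr_left _).trans (List.map_id _)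
        intro p hp
        have : p.1 ≠ t := fun h => htP (by simpa [h] using List.mem_map_of_mem (f := Prod.fst) hp)
        simp [beq_eq_false_iff_ne.mpr this]
      · congr 1
        · simp
        · apply (List.map_congr_left _).trans (List.map_id _)
          intro p hp
          have : p.1 ≠ t := fun h => htS (by simpa [h] using List.mem_map_of_mem (f := Prod.fst) hp)
          simp [beq_eq_false_iff_ne.mpr this]
    rw [hitems, hPS]
    unfold nestL
    rw [List.foldl_append, List.foldl_append]
    simp only [List.foldl_cons, nestStep_eq_pathIns']
    rw [hgetD]
    rw [← nest_fold_comm S _ t (old + 1) htS (cpath_pathIns_self _ _ _),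
      pathIns_pathIns_self]

-- the central equivalence: folding A's step = nesting the flat counts
theorem main_fold (ts : List T3) (f : PySem.Dict T3 Int) (hnd : f.keys.Nodup) :
    ts.foldl tstep (nestL f.items) = nestL ((ts.foldl flatInc f).items) := by
  induction ts generalizing f with
  | nil => rfl
  | cons t ts ih =>
    simp only [List.foldl_cons]
    have h1 : tstep (nestL f.items) t = nestL ((flatInc f t).items) := by
      unfold tstep
      rw [show stepA (nestL f.items) t.1 t.2.1 t.2.2 = pathIns (nestL f.items) (t.1, t.2.1, t.2.2) (path (nestL f.items) (t.1, t.2.1, t.2.2) + 1) from stepA_eq_pathIns _ _ _ _]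
      rw [show ((t.1, t.2.1, t.2.2) : T3) = t from rfl]
      rw [path_nestL f t hnd, nestL_flatInc f t hnd]
    rw [h1]
    exact ih (flatInc f t) (PySem.Dict.nodup_keys_insert _ _ _ hnd)

-- the while loop enumerates exactly the zip-triples
theorem triples_cons (x y z : String) (r : List String) :
    triples (x :: y :: z :: r) = (x, y, z) :: triples (y :: z :: r) := by
  simp [triples]

theorem triples_short (l : List String) (h : l.length ≤ 2) : triples l = [] := by
  match l, h with
  | [], _ => rfl
  | [a], _ => rfl
  | [a, b], _ => rfl

theorem loopA_eq (ws : List String) (i : Nat) (d : D3) :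
    loopA ws i d = (triples (ws.drop i)).foldl tstep d := by
  rw [loopA]
  split_ifs with h
  · have h' : i + 2 < ws.length := by
      have := h; push_cast at this; omega
    have hd : ws.drop i = ws[i] :: ws[i+1] :: ws[i+2] :: ws.drop (i+3) := by
      rw [List.drop_eq_getElem_cons (by omega), List.drop_eq_getElem_cons (by omega),
          List.drop_eq_getElem_cons (by omega)]
    have hd1 : ws.drop (i+1) = ws[i+1] :: ws[i+2] :: ws.drop (i+3) := by
      rw [List.drop_eq_getElem_cons (by omega), List.drop_eq_getElem_cons (by omega)]
    have e0 : ws.getD i "" = ws[i] := List.getD_eq_getElem _ _ (by omega)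
    have e1 : ws.getD (i+1) "" = ws[i+1] := List.getD_eq_getElem _ _ (by omega)
    have e2 : ws.getD (i+2) "" = ws[i+2] := List.getD_eq_getElem _ _ (by omega)
    rw [loopA_eq ws (i+1), hd, hd1, triples_cons, List.foldl_cons, e0, e1, e2]
    rfl
  · have h' : ws.length ≤ i + 2 := by
      push_cast at h; omega
    rw [triples_short _ (by simp; omega)]
    rfl
termination_by ws.length - i
decreasing_by omega

theorem zip3B_eq (ws : List String) : zip3B ws = triples ws := by
  unfold zip3B triples
  rw [show (some (1 : Int)) = some ((1 : Nat) : Int) from rfl,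
      show (some (2 : Int)) = some ((2 : Nat) : Int) from rfl,
      PySem.List.slice_from_natCast, PySem.List.slice_from_natCast]

theorem foldl_flatMap {α β γ : Type} (l : List α) (g : α → List β) (f : γ → β → γ) (a : γ) :
    (l.flatMap g).foldl f a = l.foldl (fun a x => (g x).foldl f a) a := by
  induction l generalizing a with
  | nil => rfl
  | cons x l ih => simp [List.flatMap_cons, List.foldl_append, ih]

-- ===== VERDICT (by name: the statement is the Claim_ definition above) =====
theorem get_trigrams_spec : Claim_equal_get_trigrams := by
  intro corpus _
  unfold Spec_get_trigrams get_trigrams get_trigrams_alt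
  congr 1
  have hA : ∀ (sents : List String) (d : D3),
      sents.foldl (fun trigrams sentence =>
        loopA ((PySem.Str.split? sentence " ").getD []) 0 trigrams) d
      = (sents.flatMap (fun s => triples ((PySem.Str.split? s " ").getD []))).foldl tstep d := by
    intro sents d
    rw [foldl_flatMap]
    apply List.foldl_ext
    intro a x _
    exact loopA_eq _ 0 a
  have hB : ∀ (sents : List String) (f : PySem.Dict T3 Int),
      sents.foldl (fun f sentence =>
        (zip3B ((PySem.Str.split? sentence " ").getD [])).foldl flatInc f) f
      = (sents.flatMap (fun s => triples ((PySem.Str.split? s " ").getD []))).foldl flatInc f := by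
    intro sents f
    rw [foldl_flatMap]
    apply List.foldl_ext
    intro a x _
    rw [zip3B_eq]
  rw [hA, hB]
  have := main_fold ((((PySem.Str.split? corpus ".").getD []).flatMap
      (fun s => triples ((PySem.Str.split? s " ").getD [])))) PySem.Dict.empty
      PySem.Dict.nodup_keys_empty
  simpa [nestL] using this
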